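-- pv_equiv track=rewrite | github.com/Code4Epoch/Bolaris | live_cut_word.py | customize_word_freq_dict
-- ===== SOURCE A (Python) =====
-- def customize_word_freq_dict(my_word_freq_dict, my_word_num):
--     """
--
--     :param my_word_freq_dict: 原字典
--     :param my_word_num: 前多少个词保留
--     :return: 新词典
--     """
--     dict_order = sorted(my_word_freq_dict.items(), key=lambda x: x[1], reverse=True)
--     min_num = dict_order[my_word_num][1]
--     new_dict = {}
--     for word, count in my_word_freq_dict.items():
--         if count >= min_num:
--             new_dict[word] = count
--     return new_dict
-- ===== SOURCE B (Python) =====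
-- def customize_word_freq_dict(my_word_freq_dict, my_word_num):
--     """Quickselect the threshold value in O(n) average instead of sorting, then one filter pass."""
--     items = list(my_word_freq_dict.items())
--     n = len(items)
--     i = my_word_num if my_word_num >= 0 else my_word_num + n
--     if not (0 <= i < n):
--         raise IndexError('list index out of range')
--     values = [c for _, c in items]
--     while True:
--         pivot = values[0]
--         gt = [v for v in values if v > pivot]
--         if i < len(gt):
--             values = gt
--             continue
--         eq_len = sum(1 for v in values if v == pivot)
--         if i < len(gt) + eq_len:
--             min_num = pivot
--             break
--         i -= len(gt) + eq_len
--         values = [v for v in values if v < pivot]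
--     return {w: c for w, c in items if c >= min_num}
-- ===== Notes on version B (the rewrite author's own statement) =====
-- stated objective: alternative
-- what changed: Replaces the full descending sort of the items by a quickselect that finds only the threshold value (average-linear number of comparisons), followed by a single filter pass over the original items; not measurably faster in CPython, where A's sort runs in C.
import Mathlib
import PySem

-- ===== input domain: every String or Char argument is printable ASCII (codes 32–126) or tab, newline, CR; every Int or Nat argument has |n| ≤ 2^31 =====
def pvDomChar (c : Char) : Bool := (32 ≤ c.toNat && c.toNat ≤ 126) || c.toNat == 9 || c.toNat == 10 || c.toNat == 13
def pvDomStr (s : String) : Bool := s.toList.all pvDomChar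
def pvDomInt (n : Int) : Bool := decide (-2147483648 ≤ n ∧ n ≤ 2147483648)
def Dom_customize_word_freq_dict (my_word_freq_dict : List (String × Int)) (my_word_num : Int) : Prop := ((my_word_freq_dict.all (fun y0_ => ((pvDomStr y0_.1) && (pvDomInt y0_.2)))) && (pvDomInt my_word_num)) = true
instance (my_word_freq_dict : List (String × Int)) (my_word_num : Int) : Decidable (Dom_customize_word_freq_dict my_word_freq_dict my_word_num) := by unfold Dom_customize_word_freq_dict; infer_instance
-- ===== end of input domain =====

-- B replaces A's full descending sort by a quickselect for the threshold value plus one filter pass.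

-- ===== PORT A =====
-- literal port of A: sort the items by value descending, index the sorted list at
-- my_word_num for the threshold, then rebuild a dict keeping items with count >= threshold
def customize_word_freq_dict (my_word_freq_dict : List (String × Int)) (my_word_num : Int) : List (String × Int) :=
  let dict_order := PySem.List.sorted my_word_freq_dict (fun x => x.2) true
  match PySem.List.pyGet? dict_order my_word_num with
  | none => []   -- dict_order[my_word_num] raises IndexError; excluded by Pre_
  | some p =>
    let min_num := p.2
    (my_word_freq_dict.foldl
      (fun new_dict wc => if wc.2 ≥ min_num then new_dict.insert wc.1 wc.2 else new_dict)
      (PySem.Dict.empty : PySem.Dict String Int)).items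

-- ===== PORT B =====
-- quickselect (Source B's while-loop): the i-th largest (0-based) element of a list of ints
def pvQuickselect : List Int → Nat → Int
  | [], _ => 0
  | x :: t, i =>
    let gt := (x :: t).filter (fun v => decide (x < v))
    if i < gt.length then pvQuickselect gt i
    else
      let eq_len := (x :: t).countP (fun v => decide (v = x))
      if i < gt.length + eq_len then x
      else pvQuickselect ((x :: t).filter (fun v => decide (v < x))) (i - gt.length - eq_len)
termination_by xs _ => xs.length
decreasing_by
  · simp only [List.filter_cons, decide_eq_true_eq, lt_irrefl, if_false, List.length_cons]
    exact Nat.lt_succ_of_le (List.length_filter_le _ _)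
  · simp only [List.filter_cons, decide_eq_true_eq, lt_irrefl, if_false, List.length_cons]
    exact Nat.lt_succ_of_le (List.length_filter_le _ _)

def customize_word_freq_dict_alt (my_word_freq_dict : List (String × Int)) (my_word_num : Int) : List (String × Int) :=
  let n : Int := my_word_freq_dict.length
  let i : Int := if my_word_num ≥ 0 then my_word_num else my_word_num + n
  if 0 ≤ i ∧ i < n then
    let min_num := pvQuickselect (my_word_freq_dict.map (fun wc => wc.2)) i.toNat
    my_word_freq_dict.filter (fun wc => decide (wc.2 ≥ min_num))
  else []   -- Source B raises IndexError here; excluded by Pre_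

-- ===== PRECONDITION & SPEC =====
-- Pre_ excludes (a) out-of-range indices, on which A raises IndexError (and B's Python raises
-- too), and (b) association lists with duplicate keys, which cannot arise from A's Python
-- dict argument at all.
def Pre_customize_word_freq_dict (my_word_freq_dict : List (String × Int)) (my_word_num : Int) : Prop :=
  (my_word_freq_dict.map Prod.fst).Nodup ∧ PySem.Raise.InRange my_word_freq_dict.length my_word_num
instance (my_word_freq_dict : List (String × Int)) (my_word_num : Int) : Decidable (Pre_customize_word_freq_dict my_word_freq_dict my_word_num) := by unfold Pre_customize_word_freq_dict; infer_instance
def pvWitness_customize_word_freq_dict : (List (String × Int)) × Int := ([("a", 3), ("b", 1), ("c", 2)], 1)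

def Spec_customize_word_freq_dict (my_word_freq_dict : List (String × Int)) (my_word_num : Int) (out : List (String × Int)) : Prop := out = customize_word_freq_dict_alt my_word_freq_dict my_word_num
instance (my_word_freq_dict : List (String × Int)) (my_word_num : Int) (out : List (String × Int)) : Decidable (Spec_customize_word_freq_dict my_word_freq_dict my_word_num out) := by unfold Spec_customize_word_freq_dict; infer_instance

-- ===== CLAIM (what is proved, stated in full; the proofs are below) =====
def Claim_equal_customize_word_freq_dict : Prop := ∀ (my_word_freq_dict : List (String × Int)) (my_word_num : Int), Dom_customize_word_freq_dict my_word_freq_dict my_word_num → Pre_customize_word_freq_dict my_word_freq_dict my_word_num → Spec_customize_word_freq_dict my_word_freq_dict my_word_num (customize_word_freq_dict my_word_freq_dict my_word_num)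

-- ===== LEMMAS AND PROOFS =====

theorem pv_countP_tri (l : List Int) (x : Int) (p : Int → Bool) :
    l.countP p
      = (l.filter (fun v => decide (x < v))).countP p
        + (l.filter (fun v => decide (v = x))).countP p
        + (l.filter (fun v => decide (v < x))).countP p := by
  induction l with
  | nil => simp
  | cons a t ih =>
    rcases lt_trichotomy x a with h | h | h
    · simp [List.countP_cons, h, not_lt_of_gt h, ne_of_gt h, ih]; omega
    · simp [List.countP_cons, h, ih]; omega
    · simp [List.countP_cons, h, not_lt_of_gt h, ne_of_lt h, ih]; omega

theorem pv_length_tri (l : List Int) (x : Int) :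
    l.length
      = (l.filter (fun v => decide (x < v))).length
        + (l.filter (fun v => decide (v = x))).length
        + (l.filter (fun v => decide (v < x))).length := by
  simpa [List.countP_true] using pv_countP_tri l x (fun _ => true)

theorem pv_quickselect_mem : ∀ (xs : List Int) (i : Nat), i < xs.length → pvQuickselect xs i ∈ xs := by
  intro xs i
  induction xs, i using pvQuickselect.induct with
  | case1 x => intro h; simp at h
  | case2 x t i gt h ih =>
    intro _
    have h' : i < ((x :: t).filter (fun v => decide (x < v))).length := h
    rw [pvQuickselect]
    rw [if_pos h']
    exact List.mem_of_mem_filter (ih h)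
  | case3 x t i gt h1 eq_len h2 =>
    intro _
    have h1' : ¬ i < ((x :: t).filter (fun v => decide (x < v))).length := h1
    have h2' : i < ((x :: t).filter (fun v => decide (x < v))).length + (x :: t).countP (fun v => decide (v = x)) := h2
    rw [pvQuickselect]
    rw [if_neg h1', if_pos h2']
    exact List.mem_cons_self
  | case4 x t i gt h1 eq_len h2 ih =>
    intro hi
    have h1' : ¬ i < ((x :: t).filter (fun v => decide (x < v))).length := h1
    have h2' : ¬ i < ((x :: t).filter (fun v => decide (x < v))).length + (x :: t).countP (fun v => decide (v = x)) := h2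
    have ih' : i - ((x :: t).filter (fun v => decide (x < v))).length - (x :: t).countP (fun v => decide (v = x)) < ((x :: t).filter (fun v => decide (v < x))).length →
        pvQuickselect ((x :: t).filter (fun v => decide (v < x))) (i - ((x :: t).filter (fun v => decide (x < v))).length - (x :: t).countP (fun v => decide (v = x))) ∈ (x :: t).filter (fun v => decide (v < x)) := ih
    have hlen := pv_length_tri (x :: t) x
    have heq : (x :: t).countP (fun v => decide (v = x)) = ((x :: t).filter (fun v => decide (v = x))).length :=
      List.countP_eq_length_filter
    rw [pvQuickselect]
    rw [if_neg h1', if_neg h2']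
    exact List.mem_of_mem_filter (ih' (by omega))

theorem pv_quickselect_counts : ∀ (xs : List Int) (i : Nat), i < xs.length →
    xs.countP (fun v => decide (pvQuickselect xs i < v)) ≤ i
      ∧ i < xs.countP (fun v => decide (pvQuickselect xs i ≤ v)) := by
  intro xs i
  induction xs, i using pvQuickselect.induct with
  | case1 x => intro h; simp at h
  | case2 x t i gt h ih =>
    intro _
    have h' : i < ((x :: t).filter (fun v => decide (x < v))).length := h
    have hmem := pv_quickselect_mem _ _ h'
    have hxr : x < pvQuickselect ((x :: t).filter (fun v => decide (x < v))) i := by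
      have := (List.mem_filter.mp hmem).2; simpa using this
    rw [pvQuickselect, if_pos h']
    set r := pvQuickselect ((x :: t).filter (fun v => decide (x < v))) i with hr
    have e1 : ((x :: t).filter (fun v => decide (x < v))).countP (fun v => decide (r < v))
        = (x :: t).countP (fun v => decide (r < v)) := by
      rw [List.countP_filter]
      apply List.countP_congr
      intro a _
      simp only [Bool.and_eq_true, decide_eq_true_eq]
      exact ⟨fun hp => hp.1, fun hp => ⟨hp, lt_trans hxr hp⟩⟩
    have e2 : ((x :: t).filter (fun v => decide (x < v))).countP (fun v => decide (r ≤ v))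
        = (x :: t).countP (fun v => decide (r ≤ v)) := by
      rw [List.countP_filter]
      apply List.countP_congr
      intro a _
      simp only [Bool.and_eq_true, decide_eq_true_eq]
      exact ⟨fun hp => hp.1, fun hp => ⟨hp, lt_of_lt_of_le hxr hp⟩⟩
    have ihe : ((x :: t).filter (fun v => decide (x < v))).countP (fun v => decide (r < v)) ≤ i ∧
        i < ((x :: t).filter (fun v => decide (x < v))).countP (fun v => decide (r ≤ v)) := ih h
    omega
  | case3 x t i gt h1 eq_len h2 =>
    intro _
    have h1' : ¬ i < ((x :: t).filter (fun v => decide (x < v))).length := h1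
    have h2' : i < ((x :: t).filter (fun v => decide (x < v))).length + (x :: t).countP (fun v => decide (v = x)) := h2
    rw [pvQuickselect, if_neg h1', if_pos h2']
    have e1 : (x :: t).countP (fun v => decide (x < v))
        = ((x :: t).filter (fun v => decide (x < v))).length := List.countP_eq_length_filter
    have tri := pv_countP_tri (x :: t) x (fun v => decide (x ≤ v))
    have g1 : ((x :: t).filter (fun v => decide (x < v))).countP (fun v => decide (x ≤ v))
        = ((x :: t).filter (fun v => decide (x < v))).length := by
      rw [List.countP_eq_length]
      intro a ha
      have := (List.mem_filter.mp ha).2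
      simp only [decide_eq_true_eq] at *
      exact le_of_lt this
    have g2 : ((x :: t).filter (fun v => decide (v = x))).countP (fun v => decide (x ≤ v))
        = ((x :: t).filter (fun v => decide (v = x))).length := by
      rw [List.countP_eq_length]
      intro a ha
      have := (List.mem_filter.mp ha).2
      simp only [decide_eq_true_eq] at *
      exact le_of_eq this.symm
    have g3 : ((x :: t).filter (fun v => decide (v < x))).countP (fun v => decide (x ≤ v)) = 0 := by
      rw [List.countP_eq_zero]
      intro a ha
      have := (List.mem_filter.mp ha).2
      simp only [decide_eq_true_eq] at *
      exact not_le_of_gt this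
    have heq : (x :: t).countP (fun v => decide (v = x))
        = ((x :: t).filter (fun v => decide (v = x))).length := List.countP_eq_length_filter
    omega
  | case4 x t i gt h1 eq_len h2 ih =>
    intro hi
    have h1' : ¬ i < ((x :: t).filter (fun v => decide (x < v))).length := h1
    have h2' : ¬ i < ((x :: t).filter (fun v => decide (x < v))).length + (x :: t).countP (fun v => decide (v = x)) := h2
    have heq : (x :: t).countP (fun v => decide (v = x))
        = ((x :: t).filter (fun v => decide (v = x))).length := List.countP_eq_length_filter
    have hlen := pv_length_tri (x :: t) x
    have hi' : i - ((x :: t).filter (fun v => decide (x < v))).length - (x :: t).countP (fun v => decide (v = x))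
        < ((x :: t).filter (fun v => decide (v < x))).length := by omega
    have hmem := pv_quickselect_mem _ _ hi'
    have hrx : pvQuickselect ((x :: t).filter (fun v => decide (v < x)))
        (i - ((x :: t).filter (fun v => decide (x < v))).length - (x :: t).countP (fun v => decide (v = x))) < x := by
      have := (List.mem_filter.mp hmem).2; simpa using this
    rw [pvQuickselect, if_neg h1', if_neg h2']
    set r := pvQuickselect ((x :: t).filter (fun v => decide (v < x)))
        (i - ((x :: t).filter (fun v => decide (x < v))).length - (x :: t).countP (fun v => decide (v = x))) with hr
    have ihc : ((x :: t).filter (fun v => decide (v < x))).countP (fun v => decide (r < v))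
          ≤ i - ((x :: t).filter (fun v => decide (x < v))).length - (x :: t).countP (fun v => decide (v = x)) ∧
        i - ((x :: t).filter (fun v => decide (x < v))).length - (x :: t).countP (fun v => decide (v = x))
          < ((x :: t).filter (fun v => decide (v < x))).countP (fun v => decide (r ≤ v)) := ih hi'
    have tri1 := pv_countP_tri (x :: t) x (fun v => decide (r < v))
    have tri2 := pv_countP_tri (x :: t) x (fun v => decide (r ≤ v))
    have g1 : ((x :: t).filter (fun v => decide (x < v))).countP (fun v => decide (r < v))
        = ((x :: t).filter (fun v => decide (x < v))).length := by
      rw [List.countP_eq_length]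
      intro a ha
      have := (List.mem_filter.mp ha).2
      simp only [decide_eq_true_eq] at *
      exact lt_trans hrx this
    have g2 : ((x :: t).filter (fun v => decide (v = x))).countP (fun v => decide (r < v))
        = ((x :: t).filter (fun v => decide (v = x))).length := by
      rw [List.countP_eq_length]
      intro a ha
      have := (List.mem_filter.mp ha).2
      simp only [decide_eq_true_eq] at *
      rw [this]; exact hrx
    have g1' : ((x :: t).filter (fun v => decide (x < v))).countP (fun v => decide (r ≤ v))
        = ((x :: t).filter (fun v => decide (x < v))).length := by
      rw [List.countP_eq_length]
      intro a ha
      have := (List.mem_filter.mp ha).2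
      simp only [decide_eq_true_eq] at *
      exact le_of_lt (lt_trans hrx this)
    have g2' : ((x :: t).filter (fun v => decide (v = x))).countP (fun v => decide (r ≤ v))
        = ((x :: t).filter (fun v => decide (v = x))).length := by
      rw [List.countP_eq_length]
      intro a ha
      have := (List.mem_filter.mp ha).2
      simp only [decide_eq_true_eq] at *
      rw [this]; exact le_of_lt hrx
    omega

theorem pv_sorted_counts (l : List Int) (hp : l.Pairwise (fun a b => b ≤ a))
    (j : Nat) (hj : j < l.length) :
    l.countP (fun v => decide (l[j] < v)) ≤ j ∧ j < l.countP (fun v => decide (l[j] ≤ v)) := by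
  have hpg := List.pairwise_iff_getElem.mp hp
  constructor
  · have hzero : (l.drop j).countP (fun v => decide (l[j] < v)) = 0 := by
      rw [List.countP_eq_zero]
      intro a ha
      obtain ⟨m, hm, rfl⟩ := List.mem_iff_getElem.mp ha
      have hm' : j + m < l.length := by simp only [List.length_drop] at hm; omega
      rw [List.getElem_drop]
      simp only [decide_eq_true_eq, not_lt]
      rcases Nat.eq_zero_or_pos m with rfl | h0
      · simp
      · exact hpg j (j + m) hj hm' (by omega)
    have hsplit : l.countP (fun v => decide (l[j] < v))
        = (l.take j).countP (fun v => decide (l[j] < v))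
          + (l.drop j).countP (fun v => decide (l[j] < v)) := by
      rw [← List.countP_append, List.take_append_drop]
    have hle := List.countP_le_length (l := l.take j) (p := fun v => decide (l[j] < v))
    have hlt : (l.take j).length ≤ j := by simp [List.length_take]
    omega
  · have hall : (l.take (j+1)).countP (fun v => decide (l[j] ≤ v)) = (l.take (j+1)).length := by
      rw [List.countP_eq_length]
      intro a ha
      obtain ⟨m, hm, rfl⟩ := List.mem_iff_getElem.mp ha
      have hm' : m < j + 1 := by simp only [List.length_take] at hm; omega
      rw [List.getElem_take]
      simp only [decide_eq_true_eq]
      rcases Nat.lt_succ_iff_lt_or_eq.mp hm' with hlt | rfl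
      · exact hpg m j (by omega) hj hlt
      · exact le_refl _
    have hlen : (l.take (j+1)).length = j + 1 := by simp [List.length_take]; omega
    have hsplit : l.countP (fun v => decide (l[j] ≤ v))
        = (l.take (j+1)).countP (fun v => decide (l[j] ≤ v))
          + (l.drop (j+1)).countP (fun v => decide (l[j] ≤ v)) := by
      rw [← List.countP_append, List.take_append_drop]
    omega

theorem pv_counts_unique (l : List Int) (i : Nat) (v w : Int)
    (hv : l.countP (fun a => decide (v < a)) ≤ i ∧ i < l.countP (fun a => decide (v ≤ a)))
    (hw : l.countP (fun a => decide (w < a)) ≤ i ∧ i < l.countP (fun a => decide (w ≤ a))) :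
    v = w := by
  rcases lt_trichotomy v w with h | h | h
  · exfalso
    have hle : l.countP (fun a => decide (w ≤ a)) ≤ l.countP (fun a => decide (v < a)) :=
      List.countP_mono_left (fun a _ ha => by
        simp only [decide_eq_true_eq] at *; exact lt_of_lt_of_le h ha)
    omega
  · exact h
  · exfalso
    have hle : l.countP (fun a => decide (v ≤ a)) ≤ l.countP (fun a => decide (w < a)) :=
      List.countP_mono_left (fun a _ ha => by
        simp only [decide_eq_true_eq] at *; exact lt_of_lt_of_le h ha)
    omega

-- ===== VERDICT (by name: the statement is the Claim_ definition above) =====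
theorem customize_word_freq_dict_spec : Claim_equal_customize_word_freq_dict := by
  intro d k _hdom hpre
  obtain ⟨hnd, hir⟩ := hpre
  obtain ⟨hlo, hhi⟩ : -(d.length : Int) ≤ k ∧ k < (d.length : Int) := hir
  unfold Spec_customize_word_freq_dict customize_word_freq_dict customize_word_freq_dict_alt
  set S := PySem.List.sorted d (fun x => x.2) true with hS
  have hSlen : S.length = d.length := PySem.List.length_sorted d (fun x => x.2) true
  set i : Int := if k ≥ 0 then k else k + (d.length : Int) with hidef
  have hi0 : 0 ≤ i ∧ i < (d.length : Int) := by
    rw [hidef]; split_ifs with h0 <;> omega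
  set j : Nat := i.toNat with hjdef
  have hjlt : j < d.length := by omega
  have hjS : j < S.length := by omega
  have hget : PySem.List.pyGet? S k = some S[j] := by
    simp only [PySem.List.pyGet?, PySem.List.pyIdx?, hSlen]
    by_cases h0 : (0 : Int) ≤ k
    · rw [if_pos h0, if_pos hhi]
      have : k.toNat = j := by rw [hjdef, hidef, if_pos h0]
      rw [this]
      simp [List.getElem?_eq_getElem hjS]
    · rw [if_neg h0, if_pos hlo]
      have : d.length - (-k).toNat = j := by
        rw [hjdef, hidef, if_neg (by omega)]; omega
      rw [this]
      simp [List.getElem?_eq_getElem hjS]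
  simp only [hget]
  rw [← hidef, if_pos hi0]
  -- the two thresholds coincide
  have hpairS : S.Pairwise (fun a b => b.2 ≤ a.2) :=
    PySem.List.sorted_pairwise_rev d (fun x => x.2)
  have hpairV : (S.map (fun wc => wc.2)).Pairwise (fun a b => b ≤ a) :=
    List.pairwise_map.mpr hpairS
  have hjV : j < (S.map (fun wc => wc.2)).length := by simpa using hjS
  have hperm : (S.map (fun wc => wc.2)).Perm (d.map (fun wc => wc.2)) :=
    (PySem.List.sorted_perm d (fun x => x.2) true).map (fun wc => wc.2)
  have hVj : (S.map (fun wc => wc.2))[j] = S[j].2 := by simp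
  have hcountS := pv_sorted_counts (S.map (fun wc => wc.2)) hpairV j hjV
  rw [hVj] at hcountS
  have hdlen : j < (d.map (fun wc => wc.2)).length := by simpa using hjlt
  have hcountQ := pv_quickselect_counts (d.map (fun wc => wc.2)) j hdlen
  have hvw : S[j].2 = pvQuickselect (d.map (fun wc => wc.2)) j :=
    pv_counts_unique (d.map (fun wc => wc.2)) j _ _
      ⟨by rw [← hperm.countP_eq]; exact hcountS.1, by rw [← hperm.countP_eq]; exact hcountS.2⟩
      ⟨hcountQ.1, hcountQ.2⟩
  rw [← hjdef, ← hvw]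
  -- the conditional insert loop over distinct keys builds exactly the filtered list
  rw [PySem.List.foldl_ite_eq_foldl_filter (fun wc => wc.2 ≥ S[j].2)
    (fun new_dict wc => new_dict.insert wc.1 wc.2) d (PySem.Dict.empty : PySem.Dict String Int)]
  rw [PySem.Dict.items_foldl_insert_fresh (d.filter (fun wc => decide (wc.2 ≥ S[j].2)))
    (fun wc => wc.1) (fun wc => wc.2) PySem.Dict.empty
    (fun a _ => PySem.Dict.contains_empty _)
    ((List.Sublist.map (fun wc => wc.1) (List.filter_sublist (l := d) (p := fun wc => decide (wc.2 ≥ S[j].2)))).nodup hnd)]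
  simp [PySem.Dict.empty]
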